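-- pv_equiv track=rewrite | github.com/hareshaprajapati/langgraph-agentic-ai | Single_V2_0_copy/Siko_Sat_single_hardforce.py | _hit_summary
-- ===== SOURCE A (Python) =====
-- from typing import List, Dict, Tuple
--
-- def _hit_summary(real_draw: List[int], tickets: List[List[int]]) -> Dict[str, int]:
--     rd_set = set(real_draw)
--     counts = {0: 0, 1: 0, 2: 0, 3: 0, 4: 0, 5: 0, 6: 0}
--     total_hits = 0
--     for t in tickets:
--         hit_n = len(set(t).intersection(rd_set))
--         counts[hit_n] = counts.get(hit_n, 0) + 1
--         total_hits += hit_n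
--     return {
--         "ge3": sum(counts[h] for h in counts if h >= 3),
--         "ge2": sum(counts[h] for h in counts if h >= 2),
--         "total_hits": total_hits,
--     }
-- ===== SOURCE B (Python) =====
-- from typing import List, Dict
--
-- def _hit_summary(real_draw: List[int], tickets: List[List[int]]) -> Dict[str, int]:
--     # Sort the deduplicated draw once, then count each ticket's hits with a
--     # two-pointer merge over the sorted deduplicated ticket -- no hash-set
--     # intersection and no histogram; three accumulators are kept directly.
--     draw = sorted(set(real_draw))
--     ge3 = ge2 = total = 0
--     for t in tickets:
--         tt = sorted(set(t))
--         i = j = h = 0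
--         while i < len(tt) and j < len(draw):
--             if tt[i] < draw[j]:
--                 i += 1
--             elif draw[j] < tt[i]:
--                 j += 1
--             else:
--                 h += 1
--                 i += 1
--                 j += 1
--         total += h
--         if h >= 2:
--             ge2 += 1
--             if h >= 3:
--                 ge3 += 1
--     return {"ge3": ge3, "ge2": ge2, "total_hits": total}
-- ===== Notes on version B (the rewrite author's own statement) =====
-- stated objective: alternative
-- what changed: Replaces A's hash-set intersection per ticket plus a per-hit-count histogram dict summed over its keys by a sort-then-merge strategy: the deduplicated draw and each deduplicated ticket are sorted and their intersection size is counted with a two-pointer merge, while three accumulators (ge3, ge2, total_hits) are maintained directly in the loop.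
import Mathlib
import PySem

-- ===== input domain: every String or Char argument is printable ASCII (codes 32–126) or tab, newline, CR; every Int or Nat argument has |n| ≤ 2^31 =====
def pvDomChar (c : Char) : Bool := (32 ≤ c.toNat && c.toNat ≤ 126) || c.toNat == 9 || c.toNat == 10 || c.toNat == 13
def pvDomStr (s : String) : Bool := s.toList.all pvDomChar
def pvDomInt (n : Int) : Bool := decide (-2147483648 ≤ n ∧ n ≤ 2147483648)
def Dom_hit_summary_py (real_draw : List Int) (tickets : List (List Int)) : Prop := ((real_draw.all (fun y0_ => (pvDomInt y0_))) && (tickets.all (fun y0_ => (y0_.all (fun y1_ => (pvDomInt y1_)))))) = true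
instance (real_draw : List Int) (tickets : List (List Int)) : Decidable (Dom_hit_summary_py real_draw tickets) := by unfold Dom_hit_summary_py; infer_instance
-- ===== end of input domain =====

-- B replaces A's hash-set intersections and per-hit-count histogram dict by a sort-then-merge
-- strategy: the deduplicated draw and each deduplicated ticket are sorted and intersected with a
-- two-pointer merge, while three accumulators (ge3, ge2, total) are kept directly. Objective: alternative.

-- ===== PORT A =====
-- Literal port of A: build counts = {0:0,…,6:0}, loop updating counts[hit_n] and total_hits,
-- then sum counts[h] over the dict's keys with h >= 3 / h >= 2.
def hit_summary_py (real_draw : List Int) (tickets : List (List Int)) : List (String × Int) :=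
  let rd_set := PySem.Set.ofList real_draw
  let counts0 : PySem.Dict Int Int := PySem.Dict.ofList [(0,0),(1,0),(2,0),(3,0),(4,0),(5,0),(6,0)]
  let st := tickets.foldl
    (fun (st : PySem.Dict Int Int × Int) t =>
      let hit_n := PySem.Set.len (PySem.Set.inter (PySem.Set.ofList t) rd_set)
      (st.1.insert hit_n (st.1.getD hit_n 0 + 1), st.2 + hit_n))
    (counts0, 0)
  [("ge3", ((st.1.items.filter (fun p => decide (3 ≤ p.1))).map (fun p => p.2)).sum),
   ("ge2", ((st.1.items.filter (fun p => decide (2 ≤ p.1))).map (fun p => p.2)).sum),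
   ("total_hits", st.2)]

-- ===== PORT B =====
-- B's two-pointer merge over two sorted lists: the while loop of Source B, written as the
-- recursion it performs (advance the smaller head; on equality count one and advance both).
def pvMergeCount : List Int → List Int → Int
  | [], _ => 0
  | _ :: _, [] => 0
  | a :: as, b :: bs =>
    if a < b then pvMergeCount as (b :: bs)
    else if b < a then pvMergeCount (a :: as) bs
    else pvMergeCount as bs + 1

-- Literal port of B: draw = sorted(set(real_draw)); per ticket tt = sorted(set(t)),
-- h = merge count, then total += h and the nested threshold branches.
def hit_summary_py_alt (real_draw : List Int) (tickets : List (List Int)) : List (String × Int) :=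
  let draw := PySem.List.sorted (PySem.Set.ofList real_draw) (fun x => x) false
  let st := tickets.foldl
    (fun (st : Int × Int × Int) t =>
      let tt := PySem.List.sorted (PySem.Set.ofList t) (fun x => x) false
      let h := pvMergeCount tt draw
      let total := st.2.2 + h
      if 2 ≤ h then
        if 3 ≤ h then (st.1 + 1, st.2.1 + 1, total) else (st.1, st.2.1 + 1, total)
      else (st.1, st.2.1, total))
    (0, 0, 0)
  [("ge3", st.1), ("ge2", st.2.1), ("total_hits", st.2.2)]

-- ===== PRECONDITION & SPEC =====
def Spec_hit_summary_py (real_draw : List Int) (tickets : List (List Int)) (out : List (String × Int)) : Prop := out = hit_summary_py_alt real_draw tickets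
instance (real_draw : List Int) (tickets : List (List Int)) (out : List (String × Int)) : Decidable (Spec_hit_summary_py real_draw tickets out) := by unfold Spec_hit_summary_py; infer_instance

-- ===== CLAIM (what is proved, stated in full; the proofs are below) =====
def Claim_equal_hit_summary_py : Prop := ∀ (real_draw : List Int) (tickets : List (List Int)), Dom_hit_summary_py real_draw tickets → Spec_hit_summary_py real_draw tickets (hit_summary_py real_draw tickets)

-- ===== LEMMAS AND PROOFS =====

-- The canonical middle form both ports are reduced to: the per-ticket hit count.
def pvHit (real_draw : List Int) (t : List Int) : Int :=
  PySem.Set.len (PySem.Set.inter (PySem.Set.ofList t) (PySem.Set.ofList real_draw))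

-- ---------- A side ----------

-- Splitting A's pair-state fold into the dict fold and the running sum.
theorem pv_pair_fold (hs : List Int) (d : PySem.Dict Int Int) (s : Int) :
    hs.foldl (fun st x => (st.1.insert x (st.1.getD x 0 + 1), st.2 + x)) (d, s)
      = (hs.foldl (fun d x => d.insert x (d.getD x 0 + 1)) d, s + hs.sum) := by
  induction hs generalizing d s with
  | nil => simp
  | cons x rest ih => simp [List.foldl_cons, ih, add_assoc]

-- Summing the count of each key of a Nodup superset list equals counting directly.
theorem pv_countsum (p : Int → Bool) (hs K : List Int) (hnd : K.Nodup)
    (hsub : ∀ x ∈ hs, x ∈ K) :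
    ((K.filter p).map (fun h => (hs.count h : Int))).sum = ((hs.filter p).length : Int) := by
  induction hs with
  | nil => simp
  | cons x rest ih =>
    have hx : x ∈ K := hsub x (by simp)
    have hrest : ∀ y ∈ rest, y ∈ K := fun y hy => hsub y (by simp [hy])
    have hcnt : ∀ h : Int, ((x :: rest).count h : Int)
        = (rest.count h : Int) + (if h = x then (1:Int) else 0) := by
      intro h
      by_cases hhx : h = x
      · simp [hhx]
      · simp [hhx, Ne.symm hhx]
    calc ((K.filter p).map (fun h => ((x :: rest).count h : Int))).sum
        = ((K.filter p).map (fun h => (rest.count h : Int) + (if h = x then (1:Int) else 0))).sum := by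
          congr 1; exact List.map_congr_left (fun h _ => hcnt h)
      _ = ((K.filter p).map (fun h => (rest.count h : Int))).sum
            + ((K.filter p).map (fun h => if h = x then (1:Int) else 0)).sum :=
          PySem.List.sum_map_add_int _ _ _
      _ = ((rest.filter p).length : Int) + (if p x then (1:Int) else 0) := by
          rw [ih hrest]
          congr 1
          have : ((K.filter p).map (fun h => if h = x then (1:Int) else 0)).sum
              = (((K.filter p).countP (fun h => decide (h = x)) : Nat) : Int) := by
            simpa using PySem.List.sum_map_ite_one_zero (fun h => decide (h = x)) (K.filter p)
          rw [this]
          have hkc : (K.filter p).countP (fun h => decide (h = x)) = (K.filter p).count x := by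
            simp [List.count, BEq.beq]
          rw [hkc]
          by_cases hpx : p x
          · have hmem : x ∈ K.filter p := List.mem_filter.mpr ⟨hx, hpx⟩
            have : (K.filter p).count x = 1 :=
              List.count_eq_one_of_mem (hnd.filter p) hmem
            simp [this, hpx]
          · have hmem : x ∉ K.filter p := fun hm => hpx (List.of_mem_filter hm)
            simp [List.count_eq_zero_of_not_mem hmem, hpx]
      _ = (((x :: rest).filter p).length : Int) := by
          by_cases hpx : p x <;> simp [hpx]

-- The initial literal dict maps every key to 0.
theorem pv_counts0_getD (k : Int) :
    (PySem.Dict.ofList [((0:Int),(0:Int)),(1,0),(2,0),(3,0),(4,0),(5,0),(6,0)]).getD k 0 = 0 := by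
  simp [PySem.Dict.ofList, PySem.Dict.update, PySem.Dict.getD_insert]

-- A's dict-sum over keys ≥ bound equals the threshold count of the hits list.
theorem pv_sumGe (hits : List Int) (p : Int → Bool) :
    let dF := hits.foldl (fun d x => d.insert x (d.getD x 0 + 1))
                (PySem.Dict.ofList [((0:Int),(0:Int)),(1,0),(2,0),(3,0),(4,0),(5,0),(6,0)])
    ((dF.items.filter (fun q => p q.1)).map (fun q => q.2)).sum
      = ((hits.filter p).length : Int) := by
  intro dF
  set d0 : PySem.Dict Int Int :=
    PySem.Dict.ofList [((0:Int),(0:Int)),(1,0),(2,0),(3,0),(4,0),(5,0),(6,0)] with hd0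
  have hnd0 : d0.keys.Nodup := by rw [hd0]; decide
  have hndF : dF.keys.Nodup := PySem.Dict.nodup_keys_foldl_insert hits _ d0 hnd0
  have hkeys : dF.keys = PySem.Set.update d0.keys hits :=
    PySem.Dict.keys_foldl_insert hits _ d0
  have hitems := PySem.Dict.items_eq_map_keys dF hndF 0
  have hget : ∀ k : Int, dF.getD k 0 = (hits.count k : Int) := by
    intro k
    have := PySem.Dict.getD_foldl_insert_add_one hits d0 k
    rw [hd0] at *
    simpa [pv_counts0_getD k] using this
  rw [hitems, List.filter_map, List.map_map]
  have hmapped : (List.filter ((fun q => p q.1) ∘ fun k => (k, dF.getD k 0)) dF.keys)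
      = dF.keys.filter p := by
    apply List.filter_congr; intro k _; rfl
  rw [hmapped]
  have hsub : ∀ x ∈ hits, x ∈ dF.keys := by
    intro x hx; rw [hkeys]; exact (PySem.Set.mem_update _ _ _).mpr (Or.inr hx)
  calc (List.map ((fun q => q.2) ∘ fun k => (k, dF.getD k 0)) (dF.keys.filter p)).sum
      = ((dF.keys.filter p).map (fun k => (hits.count k : Int))).sum := by
        congr 1; apply List.map_congr_left; intro k _; simp [Function.comp, hget k]
    _ = ((hits.filter p).length : Int) := pv_countsum p hits dF.keys hndF hsub

-- A's result, expressed over the list of per-ticket hit counts.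
theorem pv_A_eq (real_draw : List Int) (tickets : List (List Int)) :
    hit_summary_py real_draw tickets
      = [("ge3", ((((tickets.map (pvHit real_draw)).filter (fun h => decide (3 ≤ h))).length : Int))),
         ("ge2", ((((tickets.map (pvHit real_draw)).filter (fun h => decide (2 ≤ h))).length : Int))),
         ("total_hits", (tickets.map (pvHit real_draw)).sum)] := by
  unfold hit_summary_py pvHit
  set hit : List Int → Int :=
    fun t => PySem.Set.len (PySem.Set.inter (PySem.Set.ofList t) (PySem.Set.ofList real_draw)) with hhit
  set hits : List Int := tickets.map hit with hhits
  have hfold : tickets.foldl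
      (fun (st : PySem.Dict Int Int × Int) t =>
        (st.1.insert (hit t) (st.1.getD (hit t) 0 + 1), st.2 + hit t))
      (PySem.Dict.ofList [((0:Int),(0:Int)),(1,0),(2,0),(3,0),(4,0),(5,0),(6,0)], 0)
      = (hits.foldl (fun d x => d.insert x (d.getD x 0 + 1))
          (PySem.Dict.ofList [((0:Int),(0:Int)),(1,0),(2,0),(3,0),(4,0),(5,0),(6,0)]),
         hits.sum) := by
    have hmap : tickets.foldl
        (fun (st : PySem.Dict Int Int × Int) t =>
          (st.1.insert (hit t) (st.1.getD (hit t) 0 + 1), st.2 + hit t))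
        (PySem.Dict.ofList [((0:Int),(0:Int)),(1,0),(2,0),(3,0),(4,0),(5,0),(6,0)], 0)
        = hits.foldl (fun (st : PySem.Dict Int Int × Int) x =>
            (st.1.insert x (st.1.getD x 0 + 1), st.2 + x))
            (PySem.Dict.ofList [((0:Int),(0:Int)),(1,0),(2,0),(3,0),(4,0),(5,0),(6,0)], 0) := by
      rw [hhits, List.foldl_map]
    rw [hmap, pv_pair_fold, zero_add]
  simp only []
  rw [hfold]
  have h3 := pv_sumGe hits (fun h => decide (3 ≤ h))
  have h2 := pv_sumGe hits (fun h => decide (2 ≤ h))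
  simp only [] at h3 h2
  rw [h3, h2]

-- ---------- B side ----------

-- The merge count of two strictly increasing lists is the size of their intersection.
theorem pv_merge : ∀ (a b : List Int), a.Pairwise (· < ·) → b.Pairwise (· < ·) →
    pvMergeCount a b = ((a.filter (fun x => decide (x ∈ b))).length : Int) := by
  intro a
  induction a with
  | nil => intro b _ _; simp [pvMergeCount]
  | cons x as ih =>
    intro b
    induction b with
    | nil => intro _ _; simp [pvMergeCount]
    | cons y bs ihb =>
      intro ha hb
      have hxas : ∀ z ∈ as, x < z := (List.pairwise_cons.mp ha).1
      have hybs : ∀ z ∈ bs, y < z := (List.pairwise_cons.mp hb).1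
      by_cases h1 : x < y
      · have hxnot : x ∉ y :: bs := by
          intro hm
          rcases List.mem_cons.mp hm with h | h
          · omega
          · exact absurd h1 (by have := hybs x h; omega)
        rw [show pvMergeCount (x :: as) (y :: bs)
              = pvMergeCount as (y :: bs) by simp [pvMergeCount, h1]]
        rw [ih (y :: bs) (List.pairwise_cons.mp ha).2 hb,
            List.filter_cons_of_neg (by simpa using hxnot)]
      · by_cases h2 : y < x
        · have hynot : ∀ z ∈ x :: as, (decide (z ∈ y :: bs)) = decide (z ∈ bs) := by
            intro z hz
            have hyz : y < z := by
              rcases List.mem_cons.mp hz with h | h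
              · omega
              · have := hxas z h; omega
            simp only [List.mem_cons]
            have : ¬ z = y := by omega
            simp [this]
          rw [show pvMergeCount (x :: as) (y :: bs)
                = pvMergeCount (x :: as) bs by simp [pvMergeCount, h1, h2]]
          rw [ihb ha (List.pairwise_cons.mp hb).2]
          rw [List.filter_congr hynot]
        · have hxy : x = y := by omega
          have hmem : x ∈ y :: bs := by simp [hxy]
          have hasn : ∀ z ∈ as, (decide (z ∈ y :: bs)) = decide (z ∈ bs) := by
            intro z hz
            have := hxas z hz
            have : ¬ z = y := by omega
            simp only [List.mem_cons]
            simp [this]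
          rw [show pvMergeCount (x :: as) (y :: bs)
                = pvMergeCount as bs + 1 by simp [pvMergeCount, h1, h2]]
          rw [ih bs (List.pairwise_cons.mp ha).2 (List.pairwise_cons.mp hb).2]
          rw [List.filter_cons_of_pos (by simpa using hmem), List.filter_congr hasn]
          push_cast [List.length_cons]
          ring

-- B's per-ticket merge count is A's per-ticket set-intersection size.
theorem pv_hit_eq (real_draw t : List Int) :
    pvMergeCount (PySem.List.sorted (PySem.Set.ofList t) (fun x => x) false)
                 (PySem.List.sorted (PySem.Set.ofList real_draw) (fun x => x) false)
      = pvHit real_draw t := by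
  set st := PySem.List.sorted (PySem.Set.ofList t) (fun x => x) false with hst
  set srd := PySem.List.sorted (PySem.Set.ofList real_draw) (fun x => x) false with hsrd
  have h := pv_merge st srd
    (PySem.List.sorted_ofList_pairwise_lt t) (PySem.List.sorted_ofList_pairwise_lt real_draw)
  rw [h]
  unfold pvHit
  have hperm : (st.filter (fun x => decide (x ∈ srd))).Perm
      ((PySem.Set.ofList t).filter (fun x => decide (x ∈ srd))) :=
    (PySem.List.sorted_perm (PySem.Set.ofList t) (fun x => x) false).filter _
  have hcong : ((PySem.Set.ofList t).filter (fun x => decide (x ∈ srd)))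
      = ((PySem.Set.ofList t).filter (fun x => decide (x ∈ PySem.Set.ofList real_draw))) := by
    apply List.filter_congr
    intro z _
    simp [hsrd, PySem.List.mem_sorted]
  have hcont : ((PySem.Set.ofList t).filter (fun x => decide (x ∈ PySem.Set.ofList real_draw)))
      = PySem.Set.inter (PySem.Set.ofList t) (PySem.Set.ofList real_draw) := by
    show _ = List.filter _ _
    apply List.filter_congr
    intro z _
    simp [PySem.Set.contains_eq_listContains]
  rw [hperm.length_eq, hcong, hcont]
  simp [PySem.Set.len]

-- B's triple-accumulator fold, characterised over the hits list.
theorem pv_trip_fold (hs : List Int) (g3 g2 tot : Int) :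
    hs.foldl
      (fun (st : Int × Int × Int) h =>
        let total := st.2.2 + h
        if 2 ≤ h then
          if 3 ≤ h then (st.1 + 1, st.2.1 + 1, total) else (st.1, st.2.1 + 1, total)
        else (st.1, st.2.1, total)) (g3, g2, tot)
      = (g3 + ((hs.filter (fun h => decide (3 ≤ h))).length : Int),
         g2 + ((hs.filter (fun h => decide (2 ≤ h))).length : Int),
         tot + hs.sum) := by
  induction hs generalizing g3 g2 tot with
  | nil => simp
  | cons h rest ih =>
    simp only [List.foldl_cons]
    by_cases h2 : 2 ≤ h
    · by_cases h3 : 3 ≤ h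
      · simp only [h2, h3, if_pos]
        rw [ih]
        have p3 : decide (3 ≤ h) = true := by simp [h3]
        have p2 : decide (2 ≤ h) = true := by simp [h2]
        simp [p3, p2]
        constructor
        · ring
        · constructor
          · ring
          · ring
      · simp only [h2, if_pos, h3, if_neg, not_false_iff]
        rw [ih]
        have p3 : decide (3 ≤ h) = false := by simp [h3]
        have p2 : decide (2 ≤ h) = true := by simp [h2]
        simp [p3, p2]
        constructor
        · ring
        · ring
    · have h3 : ¬ 3 ≤ h := by omega
      simp only [h2, if_neg, not_false_iff]
      rw [ih]
      have p3 : decide (3 ≤ h) = false := by simp [h3]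
      have p2 : decide (2 ≤ h) = false := by simp [h2]
      simp [p3, p2]
      ring

-- B's result, expressed over the same list of per-ticket hit counts.
theorem pv_B_eq (real_draw : List Int) (tickets : List (List Int)) :
    hit_summary_py_alt real_draw tickets
      = [("ge3", ((((tickets.map (pvHit real_draw)).filter (fun h => decide (3 ≤ h))).length : Int))),
         ("ge2", ((((tickets.map (pvHit real_draw)).filter (fun h => decide (2 ≤ h))).length : Int))),
         ("total_hits", (tickets.map (pvHit real_draw)).sum)] := by
  unfold hit_summary_py_alt
  simp only []
  have hstep : tickets.foldl
      (fun (st : Int × Int × Int) t =>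
        let tt := PySem.List.sorted (PySem.Set.ofList t) (fun x => x) false
        let h := pvMergeCount tt (PySem.List.sorted (PySem.Set.ofList real_draw) (fun x => x) false)
        let total := st.2.2 + h
        if 2 ≤ h then
          if 3 ≤ h then (st.1 + 1, st.2.1 + 1, total) else (st.1, st.2.1 + 1, total)
        else (st.1, st.2.1, total)) ((0:Int), (0:Int), (0:Int))
      = (tickets.map (pvHit real_draw)).foldl
          (fun (st : Int × Int × Int) h =>
            let total := st.2.2 + h
            if 2 ≤ h then
              if 3 ≤ h then (st.1 + 1, st.2.1 + 1, total) else (st.1, st.2.1 + 1, total)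
            else (st.1, st.2.1, total)) ((0:Int), (0:Int), (0:Int)) := by
    rw [List.foldl_map]
    apply PySem.List.foldl_congr_mem
    intro st t _
    simp only [pv_hit_eq real_draw t]
  rw [hstep, pv_trip_fold]
  simp

-- ===== VERDICT (by name: the statement is the Claim_ definition above) =====
theorem hit_summary_py_spec : Claim_equal_hit_summary_py := by
  intro real_draw tickets _
  unfold Spec_hit_summary_py
  rw [pv_A_eq, pv_B_eq]
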